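-- pv_equiv track=rewrite | github.com/erannuc/germline_pipeline_v7 | convert2vcf_v7.py | homopolymer
-- ===== SOURCE A (Python) =====
-- def homopolymer(position, chrseq, minimal_length):
--     # report the maximal homopolymer in the fragment position-minimal_length:position+minimal_length
--     prev_char = chrseq[position-minimal_length-1]
--     max_stretch = 1
--     stretch = 1
--     for i in range(position-minimal_length, position+minimal_length):
--         if chrseq[i] == prev_char:
--             stretch += 1
--         else:
--             if stretch > max_stretch:
--                 max_stretch = stretch
--             stretch = 1
--         prev_char = chrseq[i]
--     if stretch > max_stretch:
--         max_stretch = stretch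
--     return max_stretch
-- ===== SOURCE B (Python) =====
-- def homopolymer(position, chrseq, minimal_length):
--     # Build the window explicitly, locate run boundaries, return the widest gap.
--     seq = [chrseq[position - minimal_length - 1]]
--     seq += [chrseq[i] for i in range(position - minimal_length, position + minimal_length)]
--     bounds = [0]
--     for j, (x, y) in enumerate(zip(seq, seq[1:])):
--         if x != y:
--             bounds.append(j + 1)
--     bounds.append(len(seq))
--     return max(b - a for a, b in zip(bounds, bounds[1:]))
-- ===== Notes on version B (the rewrite author's own statement) =====
-- stated objective: alternative
-- what changed: A's manual prev_char/stretch/max_stretch running counter is replaced by building the window list explicitly, collecting run-boundary positions from adjacent unequal pairs, and returning the widest gap between consecutive boundaries.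
import Mathlib
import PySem

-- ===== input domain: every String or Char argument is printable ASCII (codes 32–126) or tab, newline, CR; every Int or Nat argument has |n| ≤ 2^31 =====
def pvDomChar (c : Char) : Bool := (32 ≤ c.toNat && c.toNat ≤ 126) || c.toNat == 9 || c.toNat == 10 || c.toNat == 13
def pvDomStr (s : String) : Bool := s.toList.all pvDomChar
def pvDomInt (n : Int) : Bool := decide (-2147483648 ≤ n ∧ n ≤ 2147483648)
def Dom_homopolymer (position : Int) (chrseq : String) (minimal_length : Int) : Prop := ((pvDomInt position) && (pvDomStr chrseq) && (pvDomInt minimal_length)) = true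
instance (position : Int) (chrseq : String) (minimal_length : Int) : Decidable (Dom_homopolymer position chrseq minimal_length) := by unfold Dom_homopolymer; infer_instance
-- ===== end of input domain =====

-- B re-decomposes A's running prev/stretch/max counter as: build the window list, collect run-boundary
-- positions from adjacent unequal pairs, return the widest gap between consecutive boundaries (objective: alternative).

-- ===== PORT A =====
def homopolymer (position : Int) (chrseq : String) (minimal_length : Int) : Int :=
  let cs := chrseq.toList
  let prev_char := PySem.List.pyGetD cs (position - minimal_length - 1) ' '
  let st := (PySem.List.pyRange (position - minimal_length) (position + minimal_length) 1).foldl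
    (fun (s : Char × Int × Int) i =>
      let c := PySem.List.pyGetD cs i ' '
      if c = s.1 then (c, s.2.1, s.2.2 + 1)
      else (c, if s.2.2 > s.2.1 then s.2.2 else s.2.1, 1))
    (prev_char, 1, 1)
  if st.2.2 > st.2.1 then st.2.2 else st.2.1

-- ===== PORT B =====
def homopolymer_alt (position : Int) (chrseq : String) (minimal_length : Int) : Int :=
  let cs := chrseq.toList
  let seq : List Char := PySem.List.pyGetD cs (position - minimal_length - 1) ' ' ::
    (PySem.List.pyRange (position - minimal_length) (position + minimal_length) 1).map
      (fun i => PySem.List.pyGetD cs i ' ')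
  let bounds := (PySem.List.enumerate (seq.zip seq.tail)).foldl
      (fun (acc : List Int) jp => if jp.2.1 != jp.2.2 then acc ++ [jp.1 + 1] else acc) [0]
  let bounds := bounds ++ [(seq.length : Int)]
  ((PySem.List.max? ((bounds.zip bounds.tail).map (fun p => p.2 - p.1)) (fun x => x)).getD 0)

-- ===== PRECONDITION & SPEC =====
-- Pre_ = exactly the inputs where A raises no IndexError: the seed index position-minimal_length-1 and,
-- when minimal_length > 0, every loop index up to position+minimal_length-1 are valid Python indices.
def Pre_homopolymer (position : Int) (chrseq : String) (minimal_length : Int) : Prop :=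
  -(PySem.Str.len chrseq) ≤ position - minimal_length - 1 ∧
  position - minimal_length - 1 < PySem.Str.len chrseq ∧
  (0 < minimal_length → position + minimal_length - 1 < PySem.Str.len chrseq)
instance (position : Int) (chrseq : String) (minimal_length : Int) : Decidable (Pre_homopolymer position chrseq minimal_length) := by unfold Pre_homopolymer; infer_instance

def pvWitness_homopolymer : Int × String × Int := (2, "ACGT", 1)

def Spec_homopolymer (position : Int) (chrseq : String) (minimal_length : Int) (out : Int) : Prop := out = homopolymer_alt position chrseq minimal_length
instance (position : Int) (chrseq : String) (minimal_length : Int) (out : Int) : Decidable (Spec_homopolymer position chrseq minimal_length out) := by unfold Spec_homopolymer; infer_instance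

-- ===== CLAIM (what is proved, stated in full; the proofs are below) =====
def Claim_equal_homopolymer : Prop := ∀ (position : Int) (chrseq : String) (minimal_length : Int), Dom_homopolymer position chrseq minimal_length → Pre_homopolymer position chrseq minimal_length → Spec_homopolymer position chrseq minimal_length (homopolymer position chrseq minimal_length)

-- ===== LEMMAS AND PROOFS =====

def stepA (s : Char × Int × Int) (c : Char) : Char × Int × Int :=
  if c = s.1 then (c, s.2.1, s.2.2 + 1)
  else (c, if s.2.2 > s.2.1 then s.2.2 else s.2.1, 1)

def finishA (r : Char × Int × Int) : Int := if r.2.2 > r.2.1 then r.2.2 else r.2.1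

def runLens : List Char → List Int
  | [] => []
  | [_] => [1]
  | c :: d :: ws =>
    if c = d then
      match runLens (d :: ws) with
      | n :: t => (n + 1) :: t
      | [] => []
    else 1 :: runLens (d :: ws)

def addHead (k : Int) : List Int → List Int
  | [] => []
  | n :: t => (n + k) :: t

def diffs (l : List Int) : List Int := (l.zip l.tail).map (fun p => p.2 - p.1)

def cuts (s : Int) (seq : List Char) : List Int :=
  ((PySem.List.enumerate (seq.zip seq.tail) s).filter (fun jp => jp.2.1 != jp.2.2)).map (fun jp => jp.1 + 1)

theorem runLens_cons_head_pos : ∀ (ws : List Char) (c : Char),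
    ∃ n t, runLens (c :: ws) = n :: t ∧ 1 ≤ n := by
  intro ws
  induction ws with
  | nil => intro c; exact ⟨1, [], rfl, le_refl 1⟩
  | cons d ws' ih =>
    intro c
    obtain ⟨n, t, h, hn⟩ := ih d
    by_cases hcd : c = d
    · exact ⟨n + 1, t, by simp [runLens, hcd, h], by omega⟩
    · exact ⟨1, runLens (d :: ws'), by simp [runLens, hcd], le_refl 1⟩

theorem if_gt_eq_max (a b : Int) : (if b > a then b else a) = max a b := by
  rw [max_def]; split_ifs <;> omega

theorem stepA_finish (ws : List Char) : ∀ (c : Char) (m s : Int),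
    finishA (List.foldl stepA (c, m, s) ws)
      = List.foldl max m (addHead (s - 1) (runLens (c :: ws))) := by
  induction ws with
  | nil =>
    intro c m s
    simp [finishA, runLens, addHead, if_gt_eq_max]
  | cons d ws' ih =>
    intro c m s
    obtain ⟨n, t, h, hn⟩ := runLens_cons_head_pos ws' d
    by_cases hdc : d = c
    · have : stepA (c, m, s) d = (d, m, s + 1) := by simp [stepA, hdc]
      rw [List.foldl_cons, this, ih d m (s + 1)]
      have hcd : c = d := hdc.symm
      simp only [runLens, if_pos hcd, h, addHead]
      congr 2
      omega
    · have : stepA (c, m, s) d = (d, max m s, 1) := by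
        simp [stepA, hdc, if_gt_eq_max]
      rw [List.foldl_cons, this, ih d (max m s) 1]
      have hcd : ¬ c = d := fun hh => hdc hh.symm
      simp only [runLens, if_neg hcd, addHead, h, List.foldl_cons]
      norm_num

theorem diffs_cons_cons (a b : Int) (t : List Int) :
    diffs (a :: b :: t) = (b - a) :: diffs (b :: t) := by
  simp [diffs]

theorem cuts_key (ws : List Char) : ∀ (c : Char) (s : Int),
    diffs (s :: (cuts s (c :: ws) ++ [s + ((c :: ws).length : Int)])) = runLens (c :: ws) := by
  induction ws with
  | nil =>
    intro c s
    simp [cuts, diffs, runLens]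
  | cons d ws' ih =>
    intro c s
    have hcuts : cuts s (c :: d :: ws')
        = (if (c != d) = true then [s + 1] else []) ++ cuts (s + 1) (d :: ws') := by
      simp only [cuts, List.zip, List.tail]
      rw [List.zipWith_cons_cons, PySem.List.enumerate_cons]
      by_cases hcd : c = d <;> simp [hcd]
    have hlen : s + ((c :: d :: ws').length : Int) = (s + 1) + ((d :: ws').length : Int) := by
      simp; ring
    by_cases hcd : c = d
    · have hx : cuts s (c :: d :: ws') = cuts (s + 1) (d :: ws') := by rw [hcuts]; simp [hcd]
      rw [hx, hlen]
      obtain ⟨n, t, hrl, hn⟩ := runLens_cons_head_pos ws' d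
      have hih := ih d (s + 1)
      rw [hrl] at hih
      cases hR : cuts (s + 1) (d :: ws') ++ [(s + 1) + ((d :: ws').length : Int)] with
      | nil => simp at hR
      | cons r rest =>
        rw [hR] at hih
        rw [diffs_cons_cons] at hih
        rw [diffs_cons_cons]
        have h1 : r - (s + 1) = n := by
          have := congrArg (fun l => l.headD 0) hih; simpa using this
        have h2 : diffs (r :: rest) = t := by
          have := congrArg (fun l => l.tail) hih; simpa using this
        simp [runLens, hcd, hrl, h2]
        omega
    · have hx : cuts s (c :: d :: ws') = (s + 1) :: cuts (s + 1) (d :: ws') := by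
        simp [hcuts, hcd]
      rw [hx, hlen]
      rw [List.cons_append, diffs_cons_cons]
      rw [ih d (s + 1)]
      have : (s + 1) - s = 1 := by ring
      rw [this]
      simp [runLens, hcd]

theorem main_lemma (c : Char) (ws : List Char) :
    finishA (List.foldl stepA (c, 1, 1) ws)
      = (PySem.List.max? (diffs (0 :: (cuts 0 (c :: ws) ++ [((c :: ws).length : Int)]))) (fun x => x)).getD 0 := by
  obtain ⟨n, t, hrl, hn⟩ := runLens_cons_head_pos ws c
  have hkey := cuts_key ws c 0
  rw [show (0 : Int) + ((c :: ws).length : Int) = ((c :: ws).length : Int) by ring] at hkey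
  rw [hkey, hrl, PySem.List.max?_id_cons, stepA_finish, hrl]
  simp only [addHead, List.foldl_cons, Option.getD_some]
  congr 1
  omega

theorem bridge (c0 : Char) (ws : List Int) (g : Int → Char) :
    (let st := ws.foldl
        (fun (s : Char × Int × Int) i =>
          let c := g i
          if c = s.1 then (c, s.2.1, s.2.2 + 1)
          else (c, if s.2.2 > s.2.1 then s.2.2 else s.2.1, 1)) (c0, 1, 1);
      if st.2.2 > st.2.1 then st.2.2 else st.2.1)
    = (let seq : List Char := c0 :: ws.map g;
       let bounds := (PySem.List.enumerate (seq.zip seq.tail)).foldl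
          (fun (acc : List Int) jp => if jp.2.1 != jp.2.2 then acc ++ [jp.1 + 1] else acc) [0];
       let bounds := bounds ++ [(seq.length : Int)];
       (PySem.List.max? ((bounds.zip bounds.tail).map (fun p => p.2 - p.1)) (fun x => x)).getD 0) := by
  show finishA (List.foldl (fun s i => stepA s (g i)) (c0, 1, 1) ws)
      = (PySem.List.max? (diffs ((PySem.List.enumerate ((c0 :: ws.map g).zip (c0 :: ws.map g).tail)).foldl
            (fun (acc : List Int) jp => if jp.2.1 != jp.2.2 then acc ++ [jp.1 + 1] else acc) [0]
            ++ [((c0 :: ws.map g).length : Int)])) (fun x => x)).getD 0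
  rw [PySem.List.foldl_append_if]
  rw [show ([(0:Int)] ++ List.map (fun jp => jp.1 + 1)
        (List.filter (fun jp => jp.2.1 != jp.2.2)
          (PySem.List.enumerate ((c0 :: ws.map g).zip (c0 :: ws.map g).tail)))) ++ [((c0 :: ws.map g).length : Int)]
      = 0 :: (cuts 0 (c0 :: ws.map g) ++ [((c0 :: ws.map g).length : Int)]) from rfl]
  rw [← List.foldl_map]
  exact main_lemma c0 (ws.map g)

-- ===== VERDICT (by name: the statement is the Claim_ definition above) =====
theorem homopolymer_spec : Claim_equal_homopolymer := by
  intro position chrseq minimal_length _ _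
  unfold Spec_homopolymer homopolymer homopolymer_alt
  exact bridge _ _ _
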